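-- pv_equiv track=rewrite | github.com/Makuss88/codeWars | size-of-shirt.py | sort_shirt
-- ===== SOURCE A (Python) =====
-- def sort_shirt(size: list):
--     dic = {}
--
--     for i in range(len(size)):
--         if size[i] == 'M':
--             dic[size[i]] = 0
--
--         elif size[i][-1] == 'S':
--             dic[size[i]] = -len(size[i])
--
--         elif size[i][-1] == 'L':
--             dic[size[i]] = +len(size[i])
--
--     dic2 = {k: v for k, v in sorted(dic.items(), key=lambda item: item[1])}
--
--     return list(dic2.keys())
-- ===== SOURCE B (Python) =====
-- def sort_shirt(size: list):
--     seen = set()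
--     s_group, m_group, l_group = [], [], []
--     for s in size:
--         if s in seen:
--             continue
--         if s == 'M':
--             seen.add(s)
--             m_group.append(s)
--         elif s.endswith('S'):
--             seen.add(s)
--             s_group.append(s)
--         elif s.endswith('L'):
--             seen.add(s)
--             l_group.append(s)
--     s_group.sort(key=lambda t: -len(t))
--     l_group.sort(key=len)
--     return s_group + m_group + l_group
-- ===== Notes on version B (the rewrite author's own statement) =====
-- stated objective: alternative
-- what changed: A builds a dict of numeric keys (M=0, S-sizes -len, L-sizes +len) and stably sorts all distinct sizes by that key; B never computes numeric keys: it partitions the distinct sizes into S/M/L buckets in one pass and sorts only the S bucket (by length descending) and the L bucket (by length ascending), returning their concatenation.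
-- crash fix: On lists containing the empty string A raises IndexError at size[i][-1]; B skips '' (it matches no size class) and returns the usual ordering of the remaining sizes. — e.g. on sort_shirt(["XL", "", "S"]): A raises IndexError, B returns ["S", "XL"]
import Mathlib
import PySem

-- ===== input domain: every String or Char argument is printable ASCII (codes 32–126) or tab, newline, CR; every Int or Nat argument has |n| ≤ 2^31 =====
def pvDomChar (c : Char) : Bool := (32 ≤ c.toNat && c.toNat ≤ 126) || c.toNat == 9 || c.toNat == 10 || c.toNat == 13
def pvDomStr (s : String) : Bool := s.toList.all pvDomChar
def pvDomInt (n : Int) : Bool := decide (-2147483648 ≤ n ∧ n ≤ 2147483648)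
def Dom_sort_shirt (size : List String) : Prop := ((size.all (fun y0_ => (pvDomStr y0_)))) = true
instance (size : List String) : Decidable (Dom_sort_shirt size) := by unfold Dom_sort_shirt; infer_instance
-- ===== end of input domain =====

-- B replaces A's numeric-key global sort by a three-bucket decomposition (S-sizes sorted by length
-- descending, then 'M', then L-sizes sorted by length ascending), concatenated; objective: alternative.

-- ===== PORT A =====
-- loop body of A's first for-loop (dic[...] = ... branches on size[i])
def pvStepA (dic : PySem.Dict String Int) (s : String) : PySem.Dict String Int :=
  if s = "M" then dic.insert s 0
  else
    match PySem.Str.pyGet? s (-1) with   -- size[i][-1]; none = IndexError on "" (excluded by Pre_)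
    | some c =>
      if c = 'S' then dic.insert s (-(PySem.Str.len s))
      else if c = 'L' then dic.insert s (PySem.Str.len s)
      else dic
    | none => dic

def sort_shirt (size : List String) : List String :=
  let dic : PySem.Dict String Int :=
    (PySem.List.pyRange 0 (PySem.List.len size)).foldl
      (fun dic i => pvStepA dic (PySem.List.pyGetD size i "")) PySem.Dict.empty
  let dic2 : PySem.Dict String Int :=
    (PySem.List.sorted dic.items (fun p => p.2)).foldl
      (fun d p => d.insert p.1 p.2) PySem.Dict.empty
  dic2.keys

-- ===== PORT B =====
-- loop body of B's single pass: state (seen, s_group, m_group, l_group)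
def pvStepB (st : PySem.Set String × List String × List String × List String) (s : String) :
    PySem.Set String × List String × List String × List String :=
  if PySem.Set.contains st.1 s then st
  else if s = "M" then (PySem.Set.add st.1 s, st.2.1, st.2.2.1 ++ [s], st.2.2.2)
  else if PySem.Str.endswith s "S" then (PySem.Set.add st.1 s, st.2.1 ++ [s], st.2.2.1, st.2.2.2)
  else if PySem.Str.endswith s "L" then (PySem.Set.add st.1 s, st.2.1, st.2.2.1, st.2.2.2 ++ [s])
  else st

def sort_shirt_alt (size : List String) : List String :=
  let st := size.foldl pvStepB (PySem.Set.empty, ([], [], []))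
  PySem.List.sorted st.2.1 (fun t => -(PySem.Str.len t)) ++ st.2.2.1
    ++ PySem.List.sorted st.2.2.2 (fun t => PySem.Str.len t)

-- ===== PRECONDITION & SPEC =====
-- Pre_ excludes lists containing the empty string, on which A raises IndexError at size[i][-1].
def Pre_sort_shirt (size : List String) : Prop := "" ∉ size
instance (size : List String) : Decidable (Pre_sort_shirt size) := by unfold Pre_sort_shirt; infer_instance
def pvWitness_sort_shirt : List String := ["XL", "S", "M", "XXL", "S", "XS"]

-- On lists containing "" A raises IndexError at size[i][-1]; B skips "" (it matches no size class) and returns the usual ordering of the rest.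
def Raises_sort_shirt (size : List String) : Prop := "" ∈ size
instance (size : List String) : Decidable (Raises_sort_shirt size) := by unfold Raises_sort_shirt; infer_instance
def pvRaiseWitness_sort_shirt : List String := ["XL", "", "S"]
def pvRaiseWitnessOut_sort_shirt : List String := ["S", "XL"]

def Spec_sort_shirt (size : List String) (out : List String) : Prop := out = sort_shirt_alt size
instance (size : List String) (out : List String) : Decidable (Spec_sort_shirt size out) := by unfold Spec_sort_shirt; infer_instance

-- ===== CLAIM (what is proved, stated in full; the proofs are below) =====
def Claim_equal_sort_shirt : Prop := ∀ (size : List String), Dom_sort_shirt size → Pre_sort_shirt size → Spec_sort_shirt size (sort_shirt size)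
def Claim_raises_sort_shirt : Prop := (∀ (size : List String), Dom_sort_shirt size → Raises_sort_shirt size → ¬ Pre_sort_shirt size) ∧ (Dom_sort_shirt (pvRaiseWitness_sort_shirt) ∧ Raises_sort_shirt (pvRaiseWitness_sort_shirt) ∧ sort_shirt_alt (pvRaiseWitness_sort_shirt) = pvRaiseWitnessOut_sort_shirt)

-- ===== LEMMAS AND PROOFS =====
def pvKey (s : String) : Option Int :=
  if s = "M" then some 0
  else
    match PySem.Str.pyGet? s (-1) with
    | some c =>
      if c = 'S' then some (-(PySem.Str.len s))
      else if c = 'L' then some (PySem.Str.len s)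
      else none
    | none => none

def pvK (s : String) : Int := (pvKey s).getD 0

def pvStepD (acc : List String) (s : String) : List String :=
  if (pvKey s).isSome ∧ s ∉ acc then acc ++ [s] else acc

def pvD (l : List String) : List String := l.foldl pvStepD []

def pvPM (s : String) : Bool := s == "M"

def pvPS (s : String) : Bool := !(s == "M") && PySem.Str.endswith s "S"

def pvPL (s : String) : Bool := !(s == "M") && !(PySem.Str.endswith s "S") && PySem.Str.endswith s "L"

def pvG (k : String) : String × Int := (k, pvK k)

theorem pv_last_char (s : String) : PySem.Str.pyGet? s (-1) = s.toList.getLast? := by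
  show PySem.List.pyGet? s.toList (-1) = s.toList.getLast?
  rcases (List.eq_nil_or_concat s.toList) with h | ⟨l, a, h⟩ <;> rw [h]
  case inl => rfl
  case inr => simp [PySem.List.pyGet?, PySem.List.pyIdx?]

theorem pv_ends_chars (s : String) (c : Char) :
    PySem.Chars.endswith s.toList [c] = true ↔ s.toList.getLast? = some c := by
  rw [PySem.Chars.endswith_iff]
  constructor
  · rintro ⟨t, ht⟩; rw [← ht]; simp
  · intro hl
    rcases List.getLast?_eq_some_iff.1 hl with ⟨t, ht⟩
    exact ⟨t, ht.symm⟩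

theorem pv_len_pos (s : String) (c : Char) (h : s.toList.getLast? = some c) :
    1 ≤ PySem.Str.len s := by
  rcases List.getLast?_eq_some_iff.1 h with ⟨t, ht⟩
  simp [PySem.Str.len, ht]

theorem pvKey_char (s : String) (c : Char) (hm : ¬ s = "M") (hg : s.toList.getLast? = some c) :
    pvKey s = if c = 'S' then some (-(PySem.Str.len s))
      else if c = 'L' then some (PySem.Str.len s) else none := by
  unfold pvKey
  rw [pv_last_char, hg]
  simp [hm]

theorem pv_insertBy_append_not {α : Type} (before : α → α → Bool) (x : α) (l1 l2 : List α)
    (h : ∀ y ∈ l1, before x y = false) :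
    PySem.List.insertBy before x (l1 ++ l2) = l1 ++ PySem.List.insertBy before x l2 := by
  induction l1 with
  | nil => simp
  | cons a t ih =>
    simp only [List.cons_append, PySem.List.insertBy, h a (by simp)]
    simp [ih (fun y hy => h y (by simp [hy]))]

theorem pv_insertBy_head {α : Type} (before : α → α → Bool) (x : α) (l : List α)
    (h : ∀ y ∈ l.head?, before x y = true) :
    PySem.List.insertBy before x l = x :: l := by
  cases l with
  | nil => rfl
  | cons a t => simp only [PySem.List.insertBy, h a (by simp)]; simp

theorem pv_insertBy_append_mem {α : Type} (before : α → α → Bool) (x : α) (l1 l2 : List α)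
    (h : ∃ y ∈ l1, before x y = true) :
    PySem.List.insertBy before x (l1 ++ l2) = PySem.List.insertBy before x l1 ++ l2 := by
  induction l1 with
  | nil => simp at h
  | cons a t ih =>
    by_cases ha : before x a = true
    · simp [PySem.List.insertBy, ha]
    · rcases h with ⟨y, hy, hby⟩
      have hyt : y ∈ t := by
        rcases List.mem_cons.1 hy with rfl | h' 
        · exact absurd hby ha
        · exact h'
      simp only [List.cons_append, PySem.List.insertBy]
      rw [ih ⟨y, hyt, hby⟩]
      simp [ha]

theorem pv_insertBy_congr {α : Type} (b1 b2 : α → α → Bool) (x : α) (l : List α)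
    (h : ∀ y ∈ l, b1 x y = b2 x y) :
    PySem.List.insertBy b1 x l = PySem.List.insertBy b2 x l := by
  induction l with
  | nil => rfl
  | cons a t ih =>
    simp only [PySem.List.insertBy, h a (by simp)]
    rw [ih (fun y hy => h y (by simp [hy]))]

theorem pv_insertBy_map {α β : Type} (f : α → β) (before : β → β → Bool) (x : α) (l : List α) :
    PySem.List.insertBy before (f x) (l.map f)
      = (PySem.List.insertBy (fun a b => before (f a) (f b)) x l).map f := by
  induction l with
  | nil => rfl
  | cons a t ih =>
    simp only [List.map_cons, PySem.List.insertBy]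
    by_cases hb : before (f x) (f a) = true <;> simp [hb, ih]

theorem pv_sorted_concat {α : Type} (key : α → Int) (l : List α) (x : α) :
    PySem.List.sorted (l ++ [x]) key
      = PySem.List.insertBy (fun a b => decide (key a < key b)) x (PySem.List.sorted l key) := by
  rw [PySem.List.sorted_eq_foldl_insertBy, PySem.List.sorted_eq_foldl_insertBy, List.foldl_append]
  rfl

theorem pv_sorted_map {α β : Type} (f : α → β) (key : β → Int) (l : List α) :
    PySem.List.sorted (l.map f) key = (PySem.List.sorted l (fun a => key (f a))).map f := by
  rw [PySem.List.sorted_eq_foldl_insertBy, PySem.List.sorted_eq_foldl_insertBy]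
  suffices h : ∀ acc : List α,
      List.foldl (fun acc y => PySem.List.insertBy (fun a b => decide (key a < key b)) y acc) (acc.map f) (l.map f)
        = (List.foldl (fun acc y => PySem.List.insertBy (fun a b => decide (key (f a) < key (f b))) y acc) acc l).map f by
    simpa using h []
  induction l with
  | nil => simp
  | cons a t ih =>
    intro acc
    simp only [List.map_cons, List.foldl_cons]
    rw [pv_insertBy_map f _ a acc, ih]

theorem pv_sorted_congr {α : Type} (k1 k2 : α → Int) (l : List α)
    (h : ∀ x ∈ l, k1 x = k2 x) :
    PySem.List.sorted l k1 = PySem.List.sorted l k2 := by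
  rw [PySem.List.sorted_eq_foldl_insertBy, PySem.List.sorted_eq_foldl_insertBy]
  suffices hgen : ∀ acc : List α, (∀ x ∈ acc, k1 x = k2 x) →
      List.foldl (fun acc y => PySem.List.insertBy (fun a b => decide (k1 a < k1 b)) y acc) acc l
        = List.foldl (fun acc y => PySem.List.insertBy (fun a b => decide (k2 a < k2 b)) y acc) acc l by
    exact hgen [] (by simp)
  induction l with
  | nil => intro acc _; rfl
  | cons a t ih =>
    intro acc hacc
    simp only [List.foldl_cons]
    have h1 : PySem.List.insertBy (fun u v => decide (k1 u < k1 v)) a acc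
        = PySem.List.insertBy (fun u v => decide (k2 u < k2 v)) a acc := by
      apply pv_insertBy_congr
      intro y hy
      rw [h a (by simp), hacc y hy]
    rw [h1]
    apply ih (fun x hx => h x (by simp [hx]))
    intro y hy
    rcases (PySem.List.mem_insertBy _ _ _ _).1 hy with rfl | hy'
    · exact h y (by simp)
    · exact hacc y hy'

theorem pv_sorted_split {α : Type} (k : α → Int) (l : List α) :
    PySem.List.sorted l k
      = PySem.List.sorted (l.filter (fun x => decide (k x < 0))) k
        ++ l.filter (fun x => decide (k x = 0))
        ++ PySem.List.sorted (l.filter (fun x => decide (0 < k x))) k := by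
  induction l using List.reverseRecOn with
  | nil => rfl
  | append_singleton m x ih =>
    have hA : ∀ y ∈ PySem.List.sorted (m.filter (fun x => decide (k x < 0))) k, k y < 0 := by
      intro y hy
      have := (PySem.List.mem_sorted _ _ _ _).1 hy
      simpa using (List.mem_filter.1 this).2
    have hZ : ∀ y ∈ m.filter (fun x => decide (k x = 0)), k y = 0 := by
      intro y hy; simpa using (List.mem_filter.1 hy).2
    have hP : ∀ y ∈ PySem.List.sorted (m.filter (fun x => decide (0 < k x))) k, 0 < k y := by
      intro y hy
      have := (PySem.List.mem_sorted _ _ _ _).1 hy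
      simpa using (List.mem_filter.1 this).2
    rw [pv_sorted_concat, ih, List.filter_append, List.filter_append, List.filter_append]
    rcases lt_trichotomy (k x) 0 with hx | hx | hx
    · -- negative: goes into the first block
      have hfn : List.filter (fun y => decide (k y < 0)) [x] = [x] := by simp [hx]
      have hfz : List.filter (fun y => decide (k y = 0)) [x] = [] := by simp [hx.ne]
      have hfp : List.filter (fun y => decide (0 < k y)) [x] = [] := by simp [not_lt.2 hx.le]
      rw [hfn, hfz, hfp, List.append_nil, List.append_nil, pv_sorted_concat]
      by_cases hall : ∀ y ∈ PySem.List.sorted (m.filter (fun x => decide (k x < 0))) k,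
          (decide (k x < k y)) = false
      · have hhead : ∀ y ∈ (m.filter (fun x => decide (k x = 0))
              ++ PySem.List.sorted (m.filter (fun x => decide (0 < k x))) k).head?,
            (fun a b => decide (k a < k b)) x y = true := by
          intro y hy
          have hmem : y ∈ m.filter (fun x => decide (k x = 0))
              ++ PySem.List.sorted (m.filter (fun x => decide (0 < k x))) k :=
            List.mem_of_mem_head? hy
          rcases List.mem_append.1 hmem with h' | h'
          · simp [hZ y h', hx]
          · have := hP y h'; simp; omega
        rw [List.append_assoc, pv_insertBy_append_not _ _ _ _ hall,
            pv_insertBy_head _ _ _ hhead,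
            PySem.List.insertBy_of_forall_not_before _ _ _ hall]
        simp
      · push_neg at hall
        rcases hall with ⟨y, hy, hby⟩
        have hby' : decide (k x < k y) = true := by simpa using hby
        rw [List.append_assoc, pv_insertBy_append_mem _ _ _ _ ⟨y, hy, hby'⟩]
        simp [List.append_assoc]
    · -- zero: appended after the zero block
      have hfn : List.filter (fun y => decide (k y < 0)) [x] = [] := by simp [hx]
      have hfz : List.filter (fun y => decide (k y = 0)) [x] = [x] := by simp [hx]
      have hfp : List.filter (fun y => decide (0 < k y)) [x] = [] := by simp [hx]
      rw [hfn, hfz, hfp, List.append_nil, List.append_nil,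
          pv_insertBy_append_not, pv_insertBy_head]
      · simp [List.append_assoc]
      · intro y hy
        have := hP y (List.mem_of_mem_head? hy)
        simp; omega
      · intro y hy
        rcases List.mem_append.1 hy with h' | h'
        · have := hA y h'; simp; omega
        · have := hZ y h'; simp; omega
    · -- positive: inserted into the last block
      have hfn : List.filter (fun y => decide (k y < 0)) [x] = [] := by simp [not_lt.2 hx.le]
      have hfz : List.filter (fun y => decide (k y = 0)) [x] = [] := by simp [hx.ne']
      have hfp : List.filter (fun y => decide (0 < k y)) [x] = [x] := by simp [hx]
      rw [hfn, hfz, hfp, List.append_nil, List.append_nil, pv_sorted_concat,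
          pv_insertBy_append_not]
      intro y hy
      rcases List.mem_append.1 hy with h' | h'
      · have := hA y h'; simp; omega
      · have := hZ y h'; simp; omega

theorem pv_trichot (s : String) (h : (pvKey s).isSome) :
    (pvPS s = true ∧ pvPM s = false ∧ pvPL s = false ∧ pvK s = -(PySem.Str.len s) ∧ pvK s < 0)
    ∨ (pvPM s = true ∧ pvPS s = false ∧ pvPL s = false ∧ pvK s = 0)
    ∨ (pvPL s = true ∧ pvPS s = false ∧ pvPM s = false ∧ pvK s = PySem.Str.len s ∧ 0 < pvK s) := by
  by_cases hm : s = "M"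
  · right; left
    subst hm
    exact ⟨by simp [pvPM], by simp [pvPS], by simp [pvPL], by simp [pvK, pvKey]⟩
  · rcases hg : s.toList.getLast? with _ | c
    · exfalso
      rw [pvKey] at h
      rw [pv_last_char, hg] at h
      simp [hm] at h
    · have hkey := pvKey_char s c hm hg
      have hlen := pv_len_pos s c hg
      by_cases hcS : c = 'S'
      · left
        subst hcS
        have hend : PySem.Chars.endswith s.toList ['S'] = true := (pv_ends_chars s 'S').2 hg
        refine ⟨by simp [pvPS, hm, hend], by simp [pvPM, hm], by simp [pvPL, hend],
          by simp [pvK, hkey], by have := hlen; simp [pvK, hkey, PySem.Str.len] at this ⊢; omega⟩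
      · by_cases hcL : c = 'L'
        · right; right
          subst hcL
          have hend : PySem.Chars.endswith s.toList ['L'] = true := (pv_ends_chars s 'L').2 hg
          have hendS : PySem.Chars.endswith s.toList ['S'] = false := by
            rw [Bool.eq_false_iff]
            intro hc
            have := (pv_ends_chars s 'S').1 hc
            rw [hg] at this
            exact hcS (by simpa [eq_comm] using this)
          refine ⟨by simp [pvPL, hm, hend, hendS], by simp [pvPS, hendS], by simp [pvPM, hm],
            by simp [pvK, hkey], by have := hlen; simp [pvK, hkey, PySem.Str.len] at this ⊢; omega⟩
        · exfalso
          rw [hkey] at h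
          simp [hcS, hcL] at h

theorem pvD_aux (l : List String) : ∀ acc : List String, acc.Nodup → (∀ x ∈ acc, (pvKey x).isSome) →
    (l.foldl pvStepD acc).Nodup ∧ ∀ x ∈ l.foldl pvStepD acc, (pvKey x).isSome := by
  induction l with
  | nil => intro acc h1 h2; exact ⟨h1, h2⟩
  | cons a t ih =>
    intro acc h1 h2
    simp only [List.foldl_cons]
    unfold pvStepD
    split
    · rename_i hcond
      refine ih _ ?_ ?_
      · simp [List.nodup_append, h1]
        intro x hx hxa
        exact hcond.2 (hxa ▸ hx)
      · intro x hx
        rcases List.mem_append.1 hx with h' | h'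
        · exact h2 x h'
        · simp at h'; subst h'; exact hcond.1
    · exact ih _ h1 h2

theorem pvStepA_eq (dic : PySem.Dict String Int) (s : String) :
    pvStepA dic s = match pvKey s with | some v => dic.insert s v | none => dic := by
  unfold pvStepA pvKey
  by_cases hm : s = "M"
  · simp [hm]
  · simp only [hm, if_false]
    rcases PySem.Str.pyGet? s (-1) with _ | c
    · rfl
    · by_cases hS : c = 'S' <;> by_cases hL : c = 'L' <;> simp [hS, hL]

theorem pv_contains_mapG (D : List String) (s : String) :
    (PySem.Dict.mk (D.map pvG)).contains s = decide (s ∈ D) := by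
  rw [PySem.Dict.contains_mk]
  induction D with
  | nil => simp
  | cons a t ih =>
    by_cases ha : a = s
    · simp [pvG, ha]
    · have h1 : (a == s) = false := by simp [ha]
      have h2 : decide (s = a) = false := by simp ; exact fun h => ha h.symm
      simp [pvG, ih, h1, h2]

theorem pv_dictA (l : List String) : ∀ D : List String,
    l.foldl pvStepA (PySem.Dict.mk (D.map pvG)) = PySem.Dict.mk ((l.foldl pvStepD D).map pvG) := by
  induction l with
  | nil => intro D; rfl
  | cons s t ih =>
    intro D
    simp only [List.foldl_cons]
    have hstep : pvStepA (PySem.Dict.mk (D.map pvG)) s = PySem.Dict.mk ((pvStepD D s).map pvG) := by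
      rw [pvStepA_eq]
      rcases hk : pvKey s with _ | v
      · unfold pvStepD
        simp [hk]
      · have hv : v = pvK s := by simp [pvK, hk]
        by_cases hmem : s ∈ D
        · apply PySem.Dict.ext
          rw [PySem.Dict.items_insert_of_contains _ v (by rw [pv_contains_mapG]; simpa using hmem)]
          unfold pvStepD
          simp only [hk, Option.isSome_some, true_and, hmem, not_true_eq_false, and_false,
            if_false]
          show List.map _ (D.map pvG) = (D.map pvG)
          rw [List.map_map]
          apply List.map_congr_left
          intro k hkD
          by_cases hks : k = s
          · subst hks; simp [pvG, hv]
          · simp [pvG, hks]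
        · apply PySem.Dict.ext
          rw [PySem.Dict.items_insert_of_not_contains _ v (by rw [pv_contains_mapG]; simpa using hmem)]
          unfold pvStepD
          simp [hk, hmem, pvG, hv]
    rw [hstep, ih]

theorem pv_invB (l : List String) : ∀ D : List String,
    l.foldl pvStepB (D, D.filter pvPS, D.filter pvPM, D.filter pvPL)
      = (l.foldl pvStepD D, (l.foldl pvStepD D).filter pvPS,
          (l.foldl pvStepD D).filter pvPM, (l.foldl pvStepD D).filter pvPL) := by
  induction l with
  | nil => intro D; rfl
  | cons s t ih =>
    intro D
    simp only [List.foldl_cons]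
    have hstep : pvStepB (D, D.filter pvPS, D.filter pvPM, D.filter pvPL) s
        = (pvStepD D s, (pvStepD D s).filter pvPS, (pvStepD D s).filter pvPM,
            (pvStepD D s).filter pvPL) := by
      by_cases hmem : s ∈ D
      · unfold pvStepB pvStepD
        have hc : PySem.Set.contains D s = true := by
          simp [PySem.Set.contains, hmem]
        simp [hc, hmem]

      · have hc : PySem.Set.contains D s = false := by
          simp [PySem.Set.contains, hmem]
        have hadd : PySem.Set.add D s = D ++ [s] := by
          simp [PySem.Set.add, PySem.Set.contains, hmem]
        by_cases hm : s = "M"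
        · have hk : (pvKey s).isSome := by subst hm; simp [pvKey]
          unfold pvStepB pvStepD
          subst hm
          simp only [hc, Bool.false_eq_true, if_false, if_pos rfl, hk, hmem, not_false_eq_true,
            and_true, if_true, hadd, List.filter_append]
          simp [pvPS, pvPM, pvPL]
        · rcases hg : s.toList.getLast? with _ | c
          · -- no last char: unclassified, both sides skip
            have hends : ∀ p : List Char, p ≠ [] → PySem.Chars.endswith s.toList p = false := by
              intro p hp
              rcases List.eq_nil_or_concat p with rfl | ⟨q, c, rfl⟩
              · exact absurd rfl hp
              · rw [Bool.eq_false_iff]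
                intro hcon
                rcases PySem.Chars.endswith_iff _ _ |>.1 hcon with ⟨u, hu⟩
                have : s.toList ≠ [] := by
                  rw [← hu]; simp
                rcases List.eq_nil_or_concat s.toList with hnil | ⟨w, d, hw⟩
                · exact this hnil
                · rw [hw] at hg; simp at hg
            have hkey : pvKey s = none := by
              unfold pvKey
              rw [pv_last_char, hg]
              simp [hm]
            have h1c : PySem.Chars.endswith s.toList ['S'] = false := hends _ (by decide)
            have h2c : PySem.Chars.endswith s.toList ['L'] = false := hends _ (by decide)
            have h1 : PySem.Str.endswith s "S" = false := by
              rw [PySem.Str.endswith_eq]; exact h1c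
            have h2 : PySem.Str.endswith s "L" = false := by
              rw [PySem.Str.endswith_eq]; exact h2c
            unfold pvStepB pvStepD
            simp [hc, hm, h1, h2, h1c, h2c, hkey, hmem]
          · have hkey := pvKey_char s c hm hg
            by_cases hcS : c = 'S'
            · subst hcS
              have hendc : PySem.Chars.endswith s.toList ['S'] = true := (pv_ends_chars s 'S').2 hg
              have hend : PySem.Str.endswith s "S" = true := by
                rw [PySem.Str.endswith_eq]; exact hendc
              have hk : pvKey s = some (-(PySem.Str.len s)) := by rw [hkey]; simp
              unfold pvStepB pvStepD
              simp [hc, hm, hend, hendc, hk, hmem, hadd, List.filter_append, pvPS, pvPM, pvPL]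
            · by_cases hcL : c = 'L'
              · subst hcL
                have hendc : PySem.Chars.endswith s.toList ['L'] = true := (pv_ends_chars s 'L').2 hg
                have hend : PySem.Str.endswith s "L" = true := by
                  rw [PySem.Str.endswith_eq]; exact hendc
                have hendSc : PySem.Chars.endswith s.toList ['S'] = false := by
                  rw [Bool.eq_false_iff]
                  intro hcon
                  have := (pv_ends_chars s 'S').1 hcon
                  rw [hg] at this
                  simp at this
                have hendS : PySem.Str.endswith s "S" = false := by
                  rw [PySem.Str.endswith_eq]; exact hendSc
                have hk : pvKey s = some (PySem.Str.len s) := by rw [hkey]; simp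
                unfold pvStepB pvStepD
                simp [hc, hm, hend, hendc, hendS, hendSc, hk, hmem, hadd, List.filter_append,
                  pvPS, pvPM, pvPL]
              · have hendSc : PySem.Chars.endswith s.toList ['S'] = false := by
                  rw [Bool.eq_false_iff]
                  intro hcon
                  have := (pv_ends_chars s 'S').1 hcon
                  rw [hg] at this
                  exact hcS (by simpa [eq_comm] using this)
                have hendLc : PySem.Chars.endswith s.toList ['L'] = false := by
                  rw [Bool.eq_false_iff]
                  intro hcon
                  have := (pv_ends_chars s 'L').1 hcon
                  rw [hg] at this
                  exact hcL (by simpa [eq_comm] using this)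
                have hendS : PySem.Str.endswith s "S" = false := by
                  rw [PySem.Str.endswith_eq]; exact hendSc
                have hendL : PySem.Str.endswith s "L" = false := by
                  rw [PySem.Str.endswith_eq]; exact hendLc
                have hkn : pvKey s = none := by rw [hkey]; simp [hcS, hcL]
                unfold pvStepB pvStepD
                simp [hc, hm, hendS, hendL, hendSc, hendLc, hkn, hmem]
    rw [hstep, ih]

-- === ports (as they will appear above, using the step helpers) ===

theorem pv_A_eq (size : List String) :
    sort_shirt size = PySem.List.sorted (pvD size) pvK := by
  unfold sort_shirt
  rw [PySem.List.foldl_pyRange_pyGetD size "" pvStepA PySem.Dict.empty (le_refl 0)]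
  simp only [Int.toNat_zero, List.drop_zero]
  rw [show (PySem.Dict.empty : PySem.Dict String Int) = PySem.Dict.mk (([] : List String).map pvG) from rfl,
    pv_dictA size []]
  show ((PySem.List.sorted ((pvD size).map pvG) (fun p => p.2)).foldl
      (fun d p => d.insert p.1 p.2) PySem.Dict.empty).keys = _
  have hperm : (PySem.List.sorted ((pvD size).map pvG) (fun p => p.2)).Perm ((pvD size).map pvG) :=
    PySem.List.sorted_perm _ _ _
  have hmapfst : ((pvD size).map pvG).map Prod.fst = pvD size := by
    rw [List.map_map]
    simp [Function.comp_def, pvG]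
  have hndD : (pvD size).Nodup := (pvD_aux size [] (by simp) (by simp)).1
  have hnodup : ((PySem.List.sorted ((pvD size).map pvG) (fun p => p.2)).map Prod.fst).Nodup := by
    have h2 := hperm.map Prod.fst
    rw [hmapfst] at h2
    exact h2.nodup_iff.2 hndD
  have hitems := PySem.Dict.items_foldl_insert_fresh
    (PySem.List.sorted ((pvD size).map pvG) (fun p => p.2)) Prod.fst Prod.snd PySem.Dict.empty
    (fun a _ => PySem.Dict.contains_empty _) hnodup
  unfold PySem.Dict.keys
  rw [hitems]
  simp only [PySem.Dict.items, Prod.mk.eta]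
  show (([] : List (String × Int)) ++ _).map Prod.fst = _
  rw [List.nil_append, pv_sorted_map pvG (fun p => p.2) (pvD size), List.map_map]
  simp [Function.comp_def, pvG]

theorem pv_B_eq (size : List String) :
    sort_shirt_alt size
      = PySem.List.sorted ((pvD size).filter pvPS) (fun t => -(PySem.Str.len t))
        ++ (pvD size).filter pvPM
        ++ PySem.List.sorted ((pvD size).filter pvPL) (fun t => PySem.Str.len t) := by
  have heq := pv_invB size []
  simp only [List.filter_nil] at heq
  unfold sort_shirt_alt
  rw [show ((PySem.Set.empty, ([], [], [])) :
        PySem.Set String × List String × List String × List String)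
      = (([] : List String), ([] : List String), ([] : List String), ([] : List String)) from rfl,
    heq]
  rfl

theorem main_equal (size : List String) : sort_shirt size = sort_shirt_alt size := by
  rw [pv_A_eq, pv_B_eq]
  obtain ⟨hnd, hsome⟩ := pvD_aux size [] (by simp) (by simp)
  rw [pv_sorted_split pvK (pvD size)]
  have hfS : (pvD size).filter (fun x => decide (pvK x < 0)) = (pvD size).filter pvPS := by
    apply List.filter_congr
    intro x hx
    rcases pv_trichot x (hsome x hx) with ⟨h1, _, _, _, h5⟩ | ⟨_, h2, _, h4⟩ | ⟨_, h2, _, _, h5⟩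
    · simp [h1, h5]
    · simp [h2, h4]
    · simp [h2]; omega
  have hfM : (pvD size).filter (fun x => decide (pvK x = 0)) = (pvD size).filter pvPM := by
    apply List.filter_congr
    intro x hx
    rcases pv_trichot x (hsome x hx) with ⟨_, h2, _, _, h5⟩ | ⟨h1, _, _, h4⟩ | ⟨_, _, h3, _, h5⟩
    · simp [h2]; omega
    · simp [h1, h4]
    · simp [h3]; omega
  have hfL : (pvD size).filter (fun x => decide (0 < pvK x)) = (pvD size).filter pvPL := by
    apply List.filter_congr
    intro x hx
    rcases pv_trichot x (hsome x hx) with ⟨_, _, h3, _, h5⟩ | ⟨_, _, h3, h4⟩ | ⟨h1, _, _, _, h5⟩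
    · simp [h3]; omega
    · simp [h3, h4]
    · simp [h1, h5]
  rw [hfS, hfM, hfL]
  have hS : PySem.List.sorted ((pvD size).filter pvPS) pvK
      = PySem.List.sorted ((pvD size).filter pvPS) (fun t => -(PySem.Str.len t)) := by
    apply pv_sorted_congr
    intro x hx
    have hxD := List.mem_of_mem_filter hx
    have hxPS := List.of_mem_filter hx
    rcases pv_trichot x (hsome x hxD) with ⟨_, _, _, h4, _⟩ | ⟨_, h2, _, _⟩ | ⟨_, h2, _, _, _⟩
    · exact h4
    · rw [hxPS] at h2; cases h2
    · rw [hxPS] at h2; cases h2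
  have hL : PySem.List.sorted ((pvD size).filter pvPL) pvK
      = PySem.List.sorted ((pvD size).filter pvPL) (fun t => PySem.Str.len t) := by
    apply pv_sorted_congr
    intro x hx
    have hxD := List.mem_of_mem_filter hx
    have hxPL := List.of_mem_filter hx
    rcases pv_trichot x (hsome x hxD) with ⟨_, _, h3, _, _⟩ | ⟨_, _, h3, _⟩ | ⟨_, _, _, h4, _⟩
    · rw [hxPL] at h3; cases h3
    · rw [hxPL] at h3; cases h3
    · exact h4
  rw [hS, hL]

-- ===== VERDICT (by name: the statement is the Claim_ definition above) =====
theorem sort_shirt_spec : Claim_equal_sort_shirt := by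
  intro size _ _
  exact main_equal size

@[simp] theorem sort_shirt_raises : Claim_raises_sort_shirt := by
  unfold Claim_raises_sort_shirt
  refine ⟨fun size _ h hp => hp h, by decide⟩
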